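-- pv_equiv track=rewrite | github.com/Offonika/pricing-service | app/services/competitor_matching.py | _extract_variant
-- ===== SOURCE A (Python) =====
-- from typing import Dict, List, Optional, Sequence, Tuple
--
-- VARIANT_TOKENS = {
--     "pro",
--     "plus",
--     "max",
--     "ultra",
--     "mini",
--     "lite",
--     "fe",
--     "edge",
--     "note",
--     "se",
-- }
--
-- def _extract_variant(model_tokens: List[str]) -> Tuple[List[str], Optional[str]]:
--     if not model_tokens:
--         return model_tokens, None
--     variant = None
--     filtered: List[str] = []
--     for tok in model_tokens:
--         if tok in VARIANT_TOKENS and variant is None: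
--             variant = tok
--             continue
--         filtered.append(tok)
--     return filtered, variant
-- ===== SOURCE B (Python) =====
-- from typing import List, Optional, Tuple
--
-- VARIANT_TOKENS = {
--     "pro",
--     "plus",
--     "max",
--     "ultra",
--     "mini",
--     "lite",
--     "fe",
--     "edge",
--     "note",
--     "se",
-- }
--
-- def _extract_variant(model_tokens: List[str]) -> Tuple[List[str], Optional[str]]:
--     i = next((i for i, t in enumerate(model_tokens) if t in VARIANT_TOKENS), None)
--     if i is None:
--         return model_tokens, None
--     return model_tokens[:i] + model_tokens[i + 1:], model_tokens[i]
-- ===== Notes on version B (the rewrite author's own statement) =====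
-- stated objective: alternative
-- what changed: B locates the index of the first variant token with next/enumerate and builds the result by slicing around it, instead of A's single accumulating pass that tracks a variant flag and appends the kept tokens.
import Mathlib
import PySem

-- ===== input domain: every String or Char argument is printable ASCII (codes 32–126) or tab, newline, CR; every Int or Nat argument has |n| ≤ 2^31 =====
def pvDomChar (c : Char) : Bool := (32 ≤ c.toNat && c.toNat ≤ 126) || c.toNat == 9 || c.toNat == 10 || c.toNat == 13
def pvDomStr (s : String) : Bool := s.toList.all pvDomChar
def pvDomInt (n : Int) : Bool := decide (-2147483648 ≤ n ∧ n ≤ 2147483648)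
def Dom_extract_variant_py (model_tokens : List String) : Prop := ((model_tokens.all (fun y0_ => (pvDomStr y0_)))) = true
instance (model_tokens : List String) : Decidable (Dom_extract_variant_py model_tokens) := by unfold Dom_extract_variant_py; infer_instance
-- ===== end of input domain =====

-- B replaces A's accumulating pass (variant flag + append) by: find the index of the
-- first variant token, then slice around it; objective: alternative decomposition.

-- shared constant: the module-level set VARIANT_TOKENS (distinct elements)
def variantTokens : List String :=
  ["pro", "plus", "max", "ultra", "mini", "lite", "fe", "edge", "note", "se"]

-- ===== PORT A =====
-- A's loop: state (variant, filtered), processed token by token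
def extractVariantLoop (toks : List String) (variant : Option String)
    (filtered : List String) : List String × Option String :=
  match toks with
  | [] => (filtered, variant)
  | tok :: rest =>
      if variantTokens.contains tok && variant == none then
        extractVariantLoop rest (some tok) filtered
      else
        extractVariantLoop rest variant (filtered ++ [tok])

def extract_variant_py (model_tokens : List String) : List String × Option String :=
  if model_tokens = [] then (model_tokens, none)
  else extractVariantLoop model_tokens none []

-- ===== PORT B =====
def extract_variant_py_alt (model_tokens : List String) : List String × Option String :=
  match model_tokens.findIdx? (fun t => variantTokens.contains t) with
  | none => (model_tokens, none)
  | some i => (model_tokens.take i ++ model_tokens.drop (i + 1), model_tokens[i]?)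

-- ===== PRECONDITION & SPEC =====
def Spec_extract_variant_py (model_tokens : List String) (out : List String × Option String) : Prop := out = extract_variant_py_alt model_tokens
instance (model_tokens : List String) (out : List String × Option String) : Decidable (Spec_extract_variant_py model_tokens out) := by unfold Spec_extract_variant_py; infer_instance

-- ===== CLAIM (what is proved, stated in full; the proofs are below) =====
def Claim_equal_extract_variant_py : Prop := ∀ (model_tokens : List String), Dom_extract_variant_py model_tokens → Spec_extract_variant_py model_tokens (extract_variant_py model_tokens)

-- ===== LEMMAS AND PROOFS =====

-- once a variant has been found, the loop just appends the rest
theorem extractVariantLoop_some (toks : List String) (v : String) (acc : List String) :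
    extractVariantLoop toks (some v) acc = (acc ++ toks, some v) := by
  induction toks generalizing acc with
  | nil => simp [extractVariantLoop]
  | cons t rest ih =>
      simp [extractVariantLoop, ih]

-- the loop with no variant yet equals B's find-then-slice computation, shifted by acc
theorem extractVariantLoop_none (toks : List String) (acc : List String) :
    extractVariantLoop toks none acc =
      match toks.findIdx? (fun t => variantTokens.contains t) with
      | none => (acc ++ toks, none)
      | some i => (acc ++ (toks.take i ++ toks.drop (i + 1)), toks[i]?) := by
  induction toks generalizing acc with
  | nil => simp [extractVariantLoop]
  | cons t rest ih =>
      by_cases h : t ∈ variantTokens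
      · simp [extractVariantLoop, h, extractVariantLoop_some, List.findIdx?_cons]
      · have hc : variantTokens.contains t = false := by simpa using h
        simp only [extractVariantLoop, hc, Bool.false_and, Bool.false_eq_true, if_false]
        rw [ih, List.findIdx?_cons]
        simp only [hc]
        cases rest.findIdx? (fun t => variantTokens.contains t) with
        | none => simp
        | some i => simp

-- ===== VERDICT (by name: the statement is the Claim_ definition above) =====
theorem extract_variant_py_spec : Claim_equal_extract_variant_py := by
  intro toks _
  unfold Spec_extract_variant_py extract_variant_py extract_variant_py_alt
  cases toks with
  | nil => simp
  | cons t rest =>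
      simp only [if_neg (by simp : ¬ t :: rest = [])]
      rw [extractVariantLoop_none]
      cases hf : (t :: rest).findIdx? (fun t => variantTokens.contains t) with
      | none => simp
      | some i => simp
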